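-- pv_equiv track=rewrite | github.com/monika0603/lovely-python | strings/box_blur.py | box_blur
-- ===== SOURCE A (Python) =====
-- def matrix(input, i, j):
--
--     sum = 0
--     for x in range(i-1, i+2):
--         for y in range(j-1, j+2):
--             sum += input[x][y]
--
--     return sum//9
--
-- def box_blur(image):
--
--     sol = []
--     for i in range(1,len(image)-1):
--         temp = []
--         for j in range(1,len(image[0])-1):
--             temp.append(matrix(image, i, j))
--         sol.append(temp)
--
--     return sol
-- ===== SOURCE B (Python) =====
-- def box_blur(image):
--     # Separable blur: horizontal 3-window sums per row, then vertical sums of 3 rows.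
--     n = len(image)
--     if n < 3:
--         return []
--     w = len(image[0])
--     if w < 3:
--         return [[] for _ in range(n - 2)]
--     H = [[row[j] + row[j + 1] + row[j + 2] for j in range(w - 2)] for row in image]
--     return [[(a + b + c) // 9 for a, b, c in zip(H[i], H[i + 1], H[i + 2])]
--             for i in range(n - 2)]
-- ===== Notes on version B (the rewrite author's own statement) =====
-- stated objective: faster
-- what changed: Replaces A's per-pixel summation of all 9 neighbours (helper re-reads every cell 9 times) with a separable blur: one pass of horizontal 3-window sums per row, then vertical sums of three precomputed rows.
import Mathlib
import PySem

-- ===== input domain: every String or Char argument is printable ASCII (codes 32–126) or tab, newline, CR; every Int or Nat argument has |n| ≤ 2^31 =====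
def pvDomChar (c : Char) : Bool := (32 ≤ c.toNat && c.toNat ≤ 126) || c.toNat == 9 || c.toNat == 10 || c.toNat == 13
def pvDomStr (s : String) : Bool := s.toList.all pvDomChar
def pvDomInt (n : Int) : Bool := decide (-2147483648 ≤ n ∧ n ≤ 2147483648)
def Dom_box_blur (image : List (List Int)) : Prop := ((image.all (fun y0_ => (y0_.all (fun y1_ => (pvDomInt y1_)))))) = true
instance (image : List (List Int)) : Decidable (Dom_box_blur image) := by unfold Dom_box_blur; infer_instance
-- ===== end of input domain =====

-- B replaces A's per-pixel 9-cell summation with a separable blur (horizontal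
-- 3-window row sums, then vertical sums of three rows): measurably faster by a
-- constant factor (fewer reads/adds per cell).

-- ===== PORT A =====
-- helper 'matrix(input, i, j)' of A; out-of-range reads (A raises there; outside Pre_) default to 0/[]
def pvMatrix (input : List (List Int)) (i j : Int) : Int :=
  PySem.Int.floordiv
    ((PySem.List.pyRange (i - 1) (i + 2) 1).foldl (fun s x =>
      (PySem.List.pyRange (j - 1) (j + 2) 1).foldl (fun s y =>
        s + PySem.List.pyGetD (PySem.List.pyGetD input x []) y 0) s) 0) 9

def box_blur (image : List (List Int)) : List (List Int) :=
  (PySem.List.pyRange 1 ((image.length : Int) - 1) 1).foldl (fun sol i =>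
    sol ++ [(PySem.List.pyRange 1 (((PySem.List.pyGetD image 0 []).length : Int) - 1) 1).foldl
      (fun temp j => temp ++ [pvMatrix image i j]) []]) []

-- ===== PORT B =====
-- horizontal window sums of one row ('[row[j]+row[j+1]+row[j+2] for j in range(w-2)]')
def pvHsum (w : Nat) (row : List Int) : List Int :=
  (List.range (w - 2)).map (fun j => row.getD j 0 + row.getD (j + 1) 0 + row.getD (j + 2) 0)

def box_blur_alt (image : List (List Int)) : List (List Int) :=
  let n := image.length
  if n < 3 then []
  else
    let w := (image.headD []).length
    if w < 3 then (List.range (n - 2)).map (fun _ => ([] : List Int))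
    else
      let H := image.map (pvHsum w)
      (List.range (n - 2)).map (fun i =>
        List.zipWith (fun ab c => PySem.Int.floordiv (ab + c) 9)
          (List.zipWith (· + ·) (H.getD i []) (H.getD (i + 1) []))
          (H.getD (i + 2) []))

-- ===== PRECONDITION & SPEC =====
-- Pre_ excludes exactly the jagged images (≥3 rows, first row ≥3 wide, some row
-- narrower than the first) on which Python A raises IndexError.
def Pre_box_blur (image : List (List Int)) : Prop :=
  image.length < 3 ∨ (image.headD []).length < 3 ∨
    ∀ r ∈ image, (image.headD []).length ≤ r.length
instance (image : List (List Int)) : Decidable (Pre_box_blur image) := by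
  unfold Pre_box_blur; infer_instance

def pvWitness_box_blur : List (List Int) := [[1, 2, 3], [4, 5, 6], [7, 8, 9]]

def Spec_box_blur (image : List (List Int)) (out : List (List Int)) : Prop := out = box_blur_alt image
instance (image : List (List Int)) (out : List (List Int)) : Decidable (Spec_box_blur image out) := by unfold Spec_box_blur; infer_instance

-- ===== CLAIM (what is proved, stated in full; the proofs are below) =====
def Claim_equal_box_blur : Prop := ∀ (image : List (List Int)), Dom_box_blur image → Pre_box_blur image → Spec_box_blur image (box_blur image)

-- ===== LEMMAS AND PROOFS =====

-- cell of the image with 0 default (the value both ports read in range)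
def pvCell (image : List (List Int)) (x y : Nat) : Int := (image.getD x []).getD y 0

-- the common closed form both ports are reduced to
def pvClosed (image : List (List Int)) : List (List Int) :=
  (List.range (image.length - 2)).map (fun i =>
    (List.range ((image.headD []).length - 2)).map (fun j =>
      PySem.Int.floordiv
        (pvCell image i j + pvCell image i (j+1) + pvCell image i (j+2) +
         (pvCell image (i+1) j + pvCell image (i+1) (j+1) + pvCell image (i+1) (j+2)) +
         (pvCell image (i+2) j + pvCell image (i+2) (j+1) + pvCell image (i+2) (j+2))) 9))

theorem pvRange3 (a : Int) : PySem.List.pyRange (a - 1) (a + 2) 1 = [a - 1, a, a + 1] := by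
  rw [PySem.List.pyRange_one]
  have h : ((a + 2) - (a - 1)).toNat = 3 := by omega
  rw [h]
  simp [List.range_succ]
  omega

theorem pvMatrix_eq (image : List (List Int)) (i j : Nat) :
    pvMatrix image (1 + (i : Int)) (1 + (j : Int)) =
      PySem.Int.floordiv
        (pvCell image i j + pvCell image i (j+1) + pvCell image i (j+2) +
         (pvCell image (i+1) j + pvCell image (i+1) (j+1) + pvCell image (i+1) (j+2)) +
         (pvCell image (i+2) j + pvCell image (i+2) (j+1) + pvCell image (i+2) (j+2))) 9 := by
  unfold pvMatrix
  rw [pvRange3, pvRange3]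
  simp only [List.foldl_cons, List.foldl_nil]
  have e0 : 1 + (i : Int) - 1 = (i : Int) := by ring
  have e1 : 1 + (i : Int) + 1 = ((i + 2 : Nat) : Int) := by push_cast; ring
  have e2 : (1 + (i : Int)) = ((i + 1 : Nat) : Int) := by push_cast; ring
  have f0 : 1 + (j : Int) - 1 = (j : Int) := by ring
  have f1 : 1 + (j : Int) + 1 = ((j + 2 : Nat) : Int) := by push_cast; ring
  have f2 : (1 + (j : Int)) = ((j + 1 : Nat) : Int) := by push_cast; ring
  rw [e0, e1, e2, f0, f1, f2]
  simp only [PySem.List.pyGetD_natCast]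
  unfold pvCell
  ring_nf

-- A reduced to the closed form
theorem boxA_closed (image : List (List Int)) : box_blur image = pvClosed image := by
  unfold box_blur pvClosed
  rw [PySem.List.foldl_append_singleton_eq_map]
  rw [PySem.List.pyRange_one 1 ((image.length : Int) - 1), List.map_map]
  have hn : ((image.length : Int) - 1 - 1).toNat = image.length - 2 := by omega
  rw [hn]
  have h0 : PySem.List.pyGetD image 0 [] = image.headD [] := by
    cases image <;> simp [PySem.List.pyGetD, PySem.List.pyGet?, PySem.List.pyIdx?]
  apply List.map_congr_left
  intro i _
  simp only [Function.comp_apply]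
  rw [PySem.List.foldl_append_singleton_eq_map]
  rw [h0, PySem.List.pyRange_one 1 (((image.headD []).length : Int) - 1), List.map_map]
  have hw : (((image.headD []).length : Int) - 1 - 1).toNat = (image.headD []).length - 2 := by
    omega
  rw [hw]
  apply List.map_congr_left
  intro j _
  simp only [Function.comp_apply]
  exact pvMatrix_eq image i j

-- B reduced to the closed form
theorem boxB_closed (image : List (List Int)) : box_blur_alt image = pvClosed image := by
  unfold box_blur_alt pvClosed
  by_cases hn : image.length < 3
  · simp only [hn, if_true]
    have : image.length - 2 = 0 := by omega
    rw [this]; simp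
  · simp only [hn, if_false]
    by_cases hw : (image.headD []).length < 3
    · simp only [hw, if_true]
      apply List.map_congr_left
      intro i _
      have : (image.headD []).length - 2 = 0 := by omega
      rw [this]; simp
    · simp only [hw, if_false]
      apply List.map_congr_left
      intro i hi
      rw [List.mem_range] at hi
      have hlen : ∀ k, k < image.length →
          (image.map (pvHsum (image.headD []).length)).getD k [] =
            pvHsum (image.headD []).length (image.getD k []) := by
        intro k hk
        rw [List.getD_eq_getElem?_getD, List.getElem?_map,
            List.getElem?_eq_getElem (by simpa using hk)]
        simp [List.getD_eq_getElem?_getD, List.getElem?_eq_getElem hk]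
      rw [hlen i (by omega), hlen (i+1) (by omega), hlen (i+2) (by omega)]
      unfold pvHsum
      rw [List.zipWith_map, List.zipWith_self, List.zipWith_map, List.zipWith_self]
      apply List.map_congr_left
      intro j _
      unfold pvCell
      ring_nf

-- ===== VERDICT (by name: the statement is the Claim_ definition above) =====
theorem box_blur_spec : Claim_equal_box_blur := by
  intro image _ _
  unfold Spec_box_blur
  rw [boxA_closed, boxB_closed]
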